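-- pv_equiv track=rewrite | github.com/shamoon-ahmed/GSheetsMCP | server.py | smart_column_detection
-- ===== SOURCE A (Python) =====
-- def smart_column_detection(data_row, column_type):
--     """
--     Intelligently detect columns based on common business terminology.
--     Supports various business types: fashion, beauty, electronics, etc.
--     """
--     column_mappings = {
--         "product_name": [
--             "item_name", "product_name", "product_title", "name", "product", "title",
--             "merchandise", "article", "sku_name"
--         ],
--         "quantity": [
--             "quantity", "qty", "stock", "available", "inventory", "count",
--             "units", "pieces", "amount", "availability", "in_stock"
--         ],
--         "price": [
--             "unit_price", "price", "cost", "amount", "rate", "selling_price",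
--             "retail_price", "mrp", "value", "pkr", "usd", "inr"
--         ],
--         "id": [
--             "item_id", "product_id", "id", "sku", "code", "barcode",
--             "item_code", "product_code", "order_no", "order_id", "orderid"
--         ],
--         "status": [
--             "status", "availability", "available", "active", "enabled",
--             "payment_status", "order_status", "stock_status"
--         ],
--         "size": [
--             "size", "dimensions", "variant", "option", "type"
--         ],
--         "color": [
--             "color", "colour", "shade", "variant"
--         ],
--         "weight": [
--             "weight", "mass", "volume", "ml", "grams", "kg", "oz"
--         ]
--     }
--
--     result = {}
--     exact_matches = {}
--
--     # First pass: collect all exact matches (highest priority)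
--     for key, value in data_row.items():
--         clean_key = str(key).strip().lower().replace(' ', '_').replace('-', '_').replace('(', '').replace(')', '')
--
--         for col_type, possible_names in column_mappings.items():
--             if column_type == "all" or column_type == col_type:
--                 for possible_name in possible_names:
--                     # Exact match - highest priority
--                     if clean_key == possible_name:
--                         if col_type not in exact_matches:  # Take first exact match
--                             exact_matches[col_type] = {"key": key, "value": value, "clean_key": clean_key}
--                         break
--
--     # Second pass: partial matches only if no exact match found
--     for key, value in data_row.items():
--         clean_key = str(key).strip().lower().replace(' ', '_').replace('-', '_').replace('(', '').replace(')', '')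
--
--         for col_type, possible_names in column_mappings.items():
--             if column_type == "all" or column_type == col_type:
--                 # Skip if we already have an exact match for this column type
--                 if col_type in exact_matches:
--                     continue
--
--                 for possible_name in possible_names:
--                     # Partial match patterns
--                     if (clean_key.startswith(possible_name + '_') or
--                         clean_key.endswith('_' + possible_name) or
--                         ('_' + possible_name + '_' in clean_key)):
--                         if col_type not in result:  # Take first partial match
--                             result[col_type] = {"key": key, "value": value, "clean_key": clean_key}
--                         break
--
--     # Combine exact matches and partial matches
--     result.update(exact_matches)
--
--     return result
-- ===== SOURCE B (Python) =====
-- def smart_column_detection(data_row, column_type):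
--     """Single-pass re-implementation: one traversal of data_row collecting exact
--     and partial matches side by side, then exact matches override partials."""
--     column_mappings = {
--         "product_name": [
--             "item_name", "product_name", "product_title", "name", "product", "title",
--             "merchandise", "article", "sku_name"
--         ],
--         "quantity": [
--             "quantity", "qty", "stock", "available", "inventory", "count",
--             "units", "pieces", "amount", "availability", "in_stock"
--         ],
--         "price": [
--             "unit_price", "price", "cost", "amount", "rate", "selling_price",
--             "retail_price", "mrp", "value", "pkr", "usd", "inr"
--         ],
--         "id": [
--             "item_id", "product_id", "id", "sku", "code", "barcode",
--             "item_code", "product_code", "order_no", "order_id", "orderid"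
--         ],
--         "status": [
--             "status", "availability", "available", "active", "enabled",
--             "payment_status", "order_status", "stock_status"
--         ],
--         "size": [
--             "size", "dimensions", "variant", "option", "type"
--         ],
--         "color": [
--             "color", "colour", "shade", "variant"
--         ],
--         "weight": [
--             "weight", "mass", "volume", "ml", "grams", "kg", "oz"
--         ]
--     }
--
--     # Keep only the requested column types, and index each one's names as a set
--     # so the exact test is a membership test instead of an inner scan.
--     relevant = [(ct, names, set(names))
--                 for ct, names in column_mappings.items()
--                 if column_type == "all" or column_type == ct]
--
--     exacts = {}
--     partials = {}
--     for key, value in data_row.items():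
--         clean_key = str(key).strip().lower().replace(' ', '_').replace('-', '_').replace('(', '').replace(')', '')
--         for ct, names, name_set in relevant:
--             hit = {"key": key, "value": value, "clean_key": clean_key}
--             if ct not in exacts and clean_key in name_set:
--                 exacts[ct] = hit
--             if ct not in partials and any(
--                     clean_key.startswith(n + '_') or clean_key.endswith('_' + n)
--                     or ('_' + n + '_') in clean_key for n in names):
--                 partials[ct] = hit
--
--     result = {ct: hit for ct, hit in partials.items() if ct not in exacts}
--     result.update(exacts)
--     return result
-- ===== Notes on version B (the rewrite author's own statement) =====
-- stated objective: alternative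
-- what changed: A's two full passes over data_row (exact pass, then partial pass that consults the finished exact table) are merged into one pass that records exact matches via a per-column-type set-membership test and partial matches unconditionally, with the exact-over-partial priority restored afterwards by a comprehension filter plus dict.update.
import Mathlib
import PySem

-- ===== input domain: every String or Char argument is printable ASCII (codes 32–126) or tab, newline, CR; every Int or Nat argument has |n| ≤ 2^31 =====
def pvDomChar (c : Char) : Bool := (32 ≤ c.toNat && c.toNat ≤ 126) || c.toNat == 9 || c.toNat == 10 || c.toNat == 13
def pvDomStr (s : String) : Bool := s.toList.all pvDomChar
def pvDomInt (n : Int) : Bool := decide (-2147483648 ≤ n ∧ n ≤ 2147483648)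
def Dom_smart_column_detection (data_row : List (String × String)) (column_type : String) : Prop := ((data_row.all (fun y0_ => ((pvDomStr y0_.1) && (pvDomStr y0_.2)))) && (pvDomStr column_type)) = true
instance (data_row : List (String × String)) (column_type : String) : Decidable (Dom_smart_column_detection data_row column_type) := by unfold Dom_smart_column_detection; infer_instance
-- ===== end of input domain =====

-- B merges A's two passes over data_row into one pass with a set-indexed exact test;
-- same return value, objective: alternative (no asymptotic change).


-- ===== PORT A =====

-- shared literal data: the column-name table both Pythons contain verbatim
def pvMappings : List (String × List String) :=
  [("product_name", ["item_name", "product_name", "product_title", "name", "product", "title",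
      "merchandise", "article", "sku_name"]),
   ("quantity", ["quantity", "qty", "stock", "available", "inventory", "count",
      "units", "pieces", "amount", "availability", "in_stock"]),
   ("price", ["unit_price", "price", "cost", "amount", "rate", "selling_price",
      "retail_price", "mrp", "value", "pkr", "usd", "inr"]),
   ("id", ["item_id", "product_id", "id", "sku", "code", "barcode",
      "item_code", "product_code", "order_no", "order_id", "orderid"]),
   ("status", ["status", "availability", "available", "active", "enabled",
      "payment_status", "order_status", "stock_status"]),
   ("size", ["size", "dimensions", "variant", "option", "type"]),
   ("color", ["color", "colour", "shade", "variant"]),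
   ("weight", ["weight", "mass", "volume", "ml", "grams", "kg", "oz"])]

-- str(key).strip().lower().replace(' ','_').replace('-','_').replace('(','').replace(')','')
def pvClean (k : String) : String :=
  PySem.Str.replace (PySem.Str.replace (PySem.Str.replace (PySem.Str.replace
    (PySem.Str.lower (PySem.Str.strip k)) " " "_") "-" "_") "(" "") ")" ""

-- {"key": key, "value": value, "clean_key": clean_key}
def pvEntry (k v ck : String) : List (String × String) :=
  [("key", k), ("value", v), ("clean_key", ck)]

-- partial-match test for one possible_name (concatenations done on List Char: exact)
def pvPartialHit (ck n : String) : Bool :=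
  PySem.Chars.startswith ck.toList (n.toList ++ ['_']) ||
  PySem.Chars.endswith ck.toList ('_' :: n.toList) ||
  PySem.Chars.isIn ('_' :: (n.toList ++ ['_'])) ck.toList

-- inner 'for possible_name in possible_names' loop of A's first pass (with break)
def pvExactNames (em : PySem.Dict String (List (String × String))) (k v ck ct : String) :
    List String → PySem.Dict String (List (String × String))
  | [] => em
  | n :: rest =>
    if ck == n then (if em.contains ct then em else em.insert ct (pvEntry k v ck))
    else pvExactNames em k v ck ct rest

-- inner 'for possible_name in possible_names' loop of A's second pass (with break)
def pvPartialNames (r : PySem.Dict String (List (String × String))) (k v ck ct : String) :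
    List String → PySem.Dict String (List (String × String))
  | [] => r
  | n :: rest =>
    if pvPartialHit ck n then (if r.contains ct then r else r.insert ct (pvEntry k v ck))
    else pvPartialNames r k v ck ct rest

def smart_column_detection (data_row : List (String × String)) (column_type : String) :
    List (String × List (String × String)) :=
  let exact_matches : PySem.Dict String (List (String × String)) :=
    data_row.foldl (fun em kv =>
      let ck := pvClean kv.1
      pvMappings.foldl (fun em ctns =>
        if column_type == "all" || column_type == ctns.1 then
          pvExactNames em kv.1 kv.2 ck ctns.1 ctns.2
        else em) em) PySem.Dict.empty
  let result : PySem.Dict String (List (String × String)) :=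
    data_row.foldl (fun r kv =>
      let ck := pvClean kv.1
      pvMappings.foldl (fun r ctns =>
        if column_type == "all" || column_type == ctns.1 then
          if exact_matches.contains ctns.1 then r
          else pvPartialNames r kv.1 kv.2 ck ctns.1 ctns.2
        else r) r) PySem.Dict.empty
  (PySem.Dict.update result exact_matches.items).items

-- ===== PORT B =====

-- [(ct, names, set(names)) for ct, names in column_mappings.items() if column_type == "all" or column_type == ct]
def pvRelevant (column_type : String) : List (String × List String × PySem.Set String) :=
  (pvMappings.filter (fun p => column_type == "all" || column_type == p.1)).map
    (fun p => (p.1, p.2, PySem.Set.ofList p.2))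

def smart_column_detection_alt (data_row : List (String × String)) (column_type : String) :
    List (String × List (String × String)) :=
  let relevant := pvRelevant column_type
  let ep :
      PySem.Dict String (List (String × String)) × PySem.Dict String (List (String × String)) :=
    data_row.foldl (fun ep kv =>
      let ck := pvClean kv.1
      relevant.foldl (fun ep t =>
        let hit := pvEntry kv.1 kv.2 ck
        ((if !ep.1.contains t.1 && PySem.Set.contains t.2.2 ck then ep.1.insert t.1 hit else ep.1),
         (if !ep.2.contains t.1 && t.2.1.any (fun n => pvPartialHit ck n) then ep.2.insert t.1 hit
          else ep.2))) ep)
      (PySem.Dict.empty, PySem.Dict.empty)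
  let result : PySem.Dict String (List (String × String)) :=
    PySem.Dict.mk (ep.2.items.filter (fun p => !ep.1.contains p.1))
  (PySem.Dict.update result ep.1.items).items

-- ===== PRECONDITION & SPEC =====
def Spec_smart_column_detection (data_row : List (String × String)) (column_type : String) (out : List (String × List (String × String))) : Prop := out = smart_column_detection_alt data_row column_type
instance (data_row : List (String × String)) (column_type : String) (out : List (String × List (String × String))) : Decidable (Spec_smart_column_detection data_row column_type out) := by unfold Spec_smart_column_detection; infer_instance

-- ===== CLAIM (what is proved, stated in full; the proofs are below) =====
def Claim_equal_smart_column_detection : Prop := ∀ (data_row : List (String × String)) (column_type : String), Dom_smart_column_detection data_row column_type → Spec_smart_column_detection data_row column_type (smart_column_detection data_row column_type)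

-- ===== LEMMAS AND PROOFS =====

-- A's exact-match inner loop equals B's one-shot set-membership test
theorem pvExactNames_eq (em : PySem.Dict String (List (String × String))) (k v ck ct : String)
    (ns : List String) :
    pvExactNames em k v ck ct ns =
      if !em.contains ct && PySem.Set.contains (PySem.Set.ofList ns) ck then
        em.insert ct (pvEntry k v ck)
      else em := by
  induction ns with
  | nil => simp [pvExactNames, PySem.Set.ofList_nil]
  | cons n rest ih =>
    rcases Bool.eq_false_or_eq_true (ck == n) with h | h
    · have heq : ck = n := by simpa using h
      rcases Bool.eq_false_or_eq_true (em.contains ct) with hc | hc <;>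
        simp [pvExactNames, hc, heq]
    · have hne : ¬ (ck = n) := by simpa using h
      simp [pvExactNames, h, ih, hne]

-- A's partial-match inner loop equals B's one-shot any-test
theorem pvPartialNames_eq (r : PySem.Dict String (List (String × String))) (k v ck ct : String)
    (ns : List String) :
    pvPartialNames r k v ck ct ns =
      if !r.contains ct && ns.any (fun n => pvPartialHit ck n) then
        r.insert ct (pvEntry k v ck)
      else r := by
  induction ns with
  | nil => simp [pvPartialNames]
  | cons n rest ih =>
    rcases Bool.eq_false_or_eq_true (pvPartialHit ck n) with h | h <;>
      rcases Bool.eq_false_or_eq_true (r.contains ct) with hc | hc <;>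
        simp [pvPartialNames, h, hc, ih]

-- B's final comprehension, as a projection on dicts: keep the partial matches whose
-- column type received no exact match
def pvFE (E q : PySem.Dict String (List (String × String))) :
    PySem.Dict String (List (String × String)) :=
  PySem.Dict.mk (q.items.filter (fun p => !E.contains p.1))

theorem pvFE_contains (E q : PySem.Dict String (List (String × String))) (ct : String)
    (hE : E.contains ct = false) : (pvFE E q).contains ct = q.contains ct := by
  rw [Bool.eq_iff_iff, PySem.Dict.contains_iff_mem_keys, PySem.Dict.contains_iff_mem_keys]
  show ct ∈ (q.items.filter _).map Prod.fst ↔ ct ∈ q.items.map Prod.fst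
  simp only [List.mem_map, List.mem_filter]
  constructor
  · rintro ⟨p, ⟨hp, -⟩, rfl⟩
    exact ⟨p, hp, rfl⟩
  · rintro ⟨p, hp, rfl⟩
    exact ⟨p, ⟨hp, by simp [hE]⟩, rfl⟩

-- one (col_type, names) step: A's skip-or-scan on the projected dict is B's
-- unconditional record, projected afterwards
theorem partial_step_hom (E : PySem.Dict String (List (String × String))) (k v ck ct : String)
    (ns : List String) (q : PySem.Dict String (List (String × String))) :
    (if E.contains ct then pvFE E q else pvPartialNames (pvFE E q) k v ck ct ns)
      = pvFE E (if !q.contains ct && ns.any (fun n => pvPartialHit ck n) then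
          q.insert ct (pvEntry k v ck) else q) := by
  rcases Bool.eq_false_or_eq_true (E.contains ct) with hE | hE
  · rw [if_pos hE]
    rcases Bool.eq_false_or_eq_true (q.contains ct) with hq | hq
    · simp [hq]
    · rcases Bool.eq_false_or_eq_true (ns.any (fun n => pvPartialHit ck n)) with ha | ha
      · apply PySem.Dict.ext
        simp [pvFE, ha, hq, PySem.Dict.items_insert_of_not_contains _ _ hq,
          List.filter_append, hE]
      · simp [ha]
  · rw [if_neg (by simp [hE]), pvPartialNames_eq, pvFE_contains E q ct hE]
    rcases Bool.eq_false_or_eq_true (q.contains ct) with hq | hq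
    · simp [hq]
    · rcases Bool.eq_false_or_eq_true (ns.any (fun n => pvPartialHit ck n)) with ha | ha
      · have h1 : (pvFE E q).contains ct = false := by rw [pvFE_contains E q ct hE]; exact hq
        rw [if_pos (by simp [hq, ha]), if_pos (by simp [hq, ha])]
        apply PySem.Dict.ext
        rw [PySem.Dict.items_insert_of_not_contains _ _ h1]
        show q.items.filter _ ++ _ = ((q.insert ct (pvEntry k v ck)).items).filter _
        rw [PySem.Dict.items_insert_of_not_contains _ _ hq, List.filter_append]
        simp [hE]
      · simp [ha, hq]

-- A's whole second pass equals the pvFE-projection of B's partial component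
theorem partial_outer_hom (E : PySem.Dict String (List (String × String)))
    (column_type : String) (data_row : List (String × String)) :
    data_row.foldl (fun r kv =>
        pvMappings.foldl (fun r ctns =>
          if column_type == "all" || column_type == ctns.1 then
            if E.contains ctns.1 then r
            else pvPartialNames r kv.1 kv.2 (pvClean kv.1) ctns.1 ctns.2
          else r) r) PySem.Dict.empty
      = pvFE E (data_row.foldl (fun q kv =>
          (pvRelevant column_type).foldl (fun q t =>
            if !q.contains t.1 && t.2.1.any (fun n => pvPartialHit (pvClean kv.1) n) then
              q.insert t.1 (pvEntry kv.1 kv.2 (pvClean kv.1))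
            else q) q) PySem.Dict.empty) := by
  have hbase : pvFE E PySem.Dict.empty = PySem.Dict.empty := rfl
  have H : ∀ (q : PySem.Dict String (List (String × String))) (kv : String × String),
      pvMappings.foldl (fun r ctns =>
          if column_type == "all" || column_type == ctns.1 then
            if E.contains ctns.1 then r
            else pvPartialNames r kv.1 kv.2 (pvClean kv.1) ctns.1 ctns.2
          else r) (pvFE E q)
        = pvFE E ((pvRelevant column_type).foldl (fun q t =>
            if !q.contains t.1 && t.2.1.any (fun n => pvPartialHit (pvClean kv.1) n) then
              q.insert t.1 (pvEntry kv.1 kv.2 (pvClean kv.1))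
            else q) q) := by
    intro q kv
    rw [PySem.List.foldl_if_eq_foldl_filter
        (p := fun ctns : String × List String => column_type == "all" || column_type == ctns.1),
      pvRelevant, List.foldl_map]
    exact List.foldl_hom (pvFE E)
      (fun x y => partial_step_hom E kv.1 kv.2 (pvClean kv.1) y.1 y.2 x)
  have h := List.foldl_hom (f := pvFE E)
    (g₁ := fun q kv =>
      (pvRelevant column_type).foldl (fun q t =>
        if !q.contains t.1 && t.2.1.any (fun n => pvPartialHit (pvClean kv.1) n) then
          q.insert t.1 (pvEntry kv.1 kv.2 (pvClean kv.1))
        else q) q)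
    (g₂ := fun r kv =>
      pvMappings.foldl (fun r ctns =>
        if column_type == "all" || column_type == ctns.1 then
          if E.contains ctns.1 then r
          else pvPartialNames r kv.1 kv.2 (pvClean kv.1) ctns.1 ctns.2
        else r) r)
    (l := data_row) (init := PySem.Dict.empty) H
  rw [hbase] at h
  exact h

-- A's exact-pass inner fold equals B's inner fold over the prefiltered triples
theorem exact_fold_eq (column_type k v ck : String)
    (em : PySem.Dict String (List (String × String))) :
    pvMappings.foldl (fun em ctns =>
        if column_type == "all" || column_type == ctns.1 then
          pvExactNames em k v ck ctns.1 ctns.2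
        else em) em
      = (pvRelevant column_type).foldl (fun em t =>
          if !em.contains t.1 && PySem.Set.contains t.2.2 ck then
            em.insert t.1 (pvEntry k v ck)
          else em) em := by
  rw [PySem.List.foldl_if_eq_foldl_filter
      (p := fun ctns : String × List String => column_type == "all" || column_type == ctns.1),
    pvRelevant, List.foldl_map]
  exact PySem.List.foldl_congr_mem _ _ _ _
    (fun acc x _ => pvExactNames_eq acc k v ck x.1 x.2)

-- A's whole first pass equals B's exact component
theorem exact_outer_eq (column_type : String) (data_row : List (String × String)) :
    data_row.foldl (fun em kv =>
        pvMappings.foldl (fun em ctns =>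
          if column_type == "all" || column_type == ctns.1 then
            pvExactNames em kv.1 kv.2 (pvClean kv.1) ctns.1 ctns.2
          else em) em) PySem.Dict.empty
      = data_row.foldl (fun em kv =>
          (pvRelevant column_type).foldl (fun em t =>
            if !em.contains t.1 && PySem.Set.contains t.2.2 (pvClean kv.1) then
              em.insert t.1 (pvEntry kv.1 kv.2 (pvClean kv.1))
            else em) em) PySem.Dict.empty :=
  PySem.List.foldl_congr_mem _ _ _ _
    (fun acc kv _ => exact_fold_eq column_type kv.1 kv.2 (pvClean kv.1) acc)

-- ===== VERDICT (by name: the statement is the Claim_ definition above) =====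
theorem smart_column_detection_spec : Claim_equal_smart_column_detection := by
  intro data_row column_type _hdom
  unfold Spec_smart_column_detection smart_column_detection smart_column_detection_alt
  have hpair : data_row.foldl (fun (ep : PySem.Dict String (List (String × String)) × PySem.Dict String (List (String × String))) kv =>
        (pvRelevant column_type).foldl (fun ep t =>
          ((if !ep.1.contains t.1 && PySem.Set.contains t.2.2 (pvClean kv.1) then
              ep.1.insert t.1 (pvEntry kv.1 kv.2 (pvClean kv.1)) else ep.1),
           (if !ep.2.contains t.1 && t.2.1.any (fun n => pvPartialHit (pvClean kv.1) n) then
              ep.2.insert t.1 (pvEntry kv.1 kv.2 (pvClean kv.1)) else ep.2))) ep)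
        (PySem.Dict.empty, PySem.Dict.empty)
      = (data_row.foldl (fun em kv =>
            (pvRelevant column_type).foldl (fun em t =>
              if !em.contains t.1 && PySem.Set.contains t.2.2 (pvClean kv.1) then
                em.insert t.1 (pvEntry kv.1 kv.2 (pvClean kv.1))
              else em) em) PySem.Dict.empty,
         data_row.foldl (fun q kv =>
            (pvRelevant column_type).foldl (fun q t =>
              if !q.contains t.1 && t.2.1.any (fun n => pvPartialHit (pvClean kv.1) n) then
                q.insert t.1 (pvEntry kv.1 kv.2 (pvClean kv.1))
              else q) q) PySem.Dict.empty) := by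
    exact (PySem.List.foldl_congr_mem _ _
        (fun (ep : PySem.Dict String (List (String × String)) × PySem.Dict String (List (String × String))) (kv : String × String) =>
          ((pvRelevant column_type).foldl (fun em t =>
              if !em.contains t.1 && PySem.Set.contains t.2.2 (pvClean kv.1) then
                em.insert t.1 (pvEntry kv.1 kv.2 (pvClean kv.1))
              else em) ep.1,
           (pvRelevant column_type).foldl (fun q t =>
              if !q.contains t.1 && t.2.1.any (fun n => pvPartialHit (pvClean kv.1) n) then
                q.insert t.1 (pvEntry kv.1 kv.2 (pvClean kv.1))
              else q) ep.2)) _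
        (fun ep kv _ => PySem.List.foldl_prod_mk _ _ _ ep.1 ep.2)).trans
      (PySem.List.foldl_prod_mk
        (f := fun (em : PySem.Dict String (List (String × String))) (kv : String × String) =>
          (pvRelevant column_type).foldl (fun em t =>
            if !em.contains t.1 && PySem.Set.contains t.2.2 (pvClean kv.1) then
              em.insert t.1 (pvEntry kv.1 kv.2 (pvClean kv.1))
            else em) em)
        (g := fun (q : PySem.Dict String (List (String × String))) (kv : String × String) =>
          (pvRelevant column_type).foldl (fun q t =>
            if !q.contains t.1 && t.2.1.any (fun n => pvPartialHit (pvClean kv.1) n) then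
              q.insert t.1 (pvEntry kv.1 kv.2 (pvClean kv.1))
            else q) q)
        _ _ _)
  simp only [hpair]
  rw [← exact_outer_eq column_type data_row]
  rw [partial_outer_hom _ column_type data_row]
  rfl
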